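-- pv_equiv track=rewrite | github.com/byeonwoojung/Algorithm | 프로그래머스/1/92334. 신고 결과 받기/신고 결과 받기.py | solution
-- ===== SOURCE A (Python) =====
-- def solution(id_list, report, k):
--     answer = []
--     sos = dict()
--
--     for id in id_list:
--         sos[id] = [set(), set(), 0, 0]  # 유저 id : [신고한 id set, 해당 유저 신고한 id set, 신고 당한 횟수, 메일 받은 횟수]
--
--     for report_one in report:
--         user_id, sos_id = report_one.split() # [유저 id, 신고한 id]
--         sos[user_id][0].add(sos_id)
--         sos[sos_id][1].add(user_id)
--         sos[sos_id][2] = len(sos[sos_id][1])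
--
--     for user_id, sos_list in sos.items():
--         if sos_list[2] >= k:
--             for u_id in sos_list[1]:
--                 sos[u_id][3] += 1
--
--     answer = [y[3] for x, y in sos.items()]
--
--     return answer
-- ===== SOURCE B (Python) =====
-- def solution(id_list, report, k):
--     edges = [tuple(r.split()) for r in report]
--     ids = list(dict.fromkeys(id_list))
--     banned = [t for t in ids if len({a for a, b in edges if b == t}) >= k]
--     edge_set = set(edges)
--     return [sum((i, t) in edge_set for t in banned) for i in ids]
-- ===== Notes on version B (the rewrite author's own statement) =====
-- stated objective: simpler
-- what changed: B inverts the counting direction: instead of A's mutable per-user record dict updated across three passes (reporter sets, report counts, mail increments credited from each banned target to its reporters), B is a declarative pipeline of comprehensions that, for each user, directly counts how many banned targets that user reported.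
import Mathlib
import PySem

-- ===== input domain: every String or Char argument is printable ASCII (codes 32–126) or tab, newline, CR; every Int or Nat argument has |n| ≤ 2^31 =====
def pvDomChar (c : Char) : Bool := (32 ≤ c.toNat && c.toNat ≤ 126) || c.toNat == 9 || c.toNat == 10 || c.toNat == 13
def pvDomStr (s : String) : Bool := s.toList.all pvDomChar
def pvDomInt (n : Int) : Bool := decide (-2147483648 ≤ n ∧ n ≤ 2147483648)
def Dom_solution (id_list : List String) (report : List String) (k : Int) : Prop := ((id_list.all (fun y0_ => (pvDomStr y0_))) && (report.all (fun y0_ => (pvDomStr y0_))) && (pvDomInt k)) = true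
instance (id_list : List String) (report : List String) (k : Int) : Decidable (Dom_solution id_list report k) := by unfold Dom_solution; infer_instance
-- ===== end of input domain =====

-- B inverts the counting direction: instead of A's mutable per-user record dict updated over
-- three passes (reporter sets, report counts, mail increments credited from each banned target
-- to its reporters), B is a declarative pipeline of comprehensions that, for each user,
-- directly counts how many banned targets that user reported.  Objective: simpler.
-- Equivalence is claimed on Pre_ (every report line has exactly two whitespace-separated
-- tokens, both registered ids) — elsewhere the Python A raises.

-- ===== PORT A =====

-- the tuple standing for A's 4-element list [set(), set(), 0, 0]
def pvInitA : PySem.Set String × PySem.Set String × Int × Int :=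
  (PySem.Set.empty, PySem.Set.empty, 0, 0)

def solution (id_list : List String) (report : List String) (k : Int) : List Int :=
  -- for id in id_list: sos[id] = [set(), set(), 0, 0]
  let sos0 : PySem.Dict String (PySem.Set String × PySem.Set String × Int × Int) :=
    id_list.foldl (fun d i => d.insert i pvInitA) PySem.Dict.empty
  -- for report_one in report: … (unpacking of ≠ 2 tokens raises ValueError in Python, and a
  -- missing key raises KeyError: both are excluded by Pre_; the fallback branches are unreachable there)
  let sos1 := report.foldl (fun d r =>
    match PySem.Str.split₀ r with
    | [user_id, sos_id] =>
      -- sos[user_id][0].add(sos_id)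
      let d := d.modify user_id pvInitA (fun v => (PySem.Set.add v.1 sos_id, v.2.1, v.2.2.1, v.2.2.2))
      -- sos[sos_id][1].add(user_id)
      let d := d.modify sos_id pvInitA (fun v => (v.1, PySem.Set.add v.2.1 user_id, v.2.2.1, v.2.2.2))
      -- sos[sos_id][2] = len(sos[sos_id][1])
      d.modify sos_id pvInitA (fun v => (v.1, v.2.1, (PySem.Set.len v.2.1 : Int), v.2.2.2))
    | _ => d) sos0
  -- for user_id, sos_list in sos.items(): … (keys never change and fields 0–2 are not written in
  -- this loop, so iterating a snapshot of the keys while reading the live dict is Python-exact;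
  -- the inner 'for u_id in sos_list[1]' iterates a set, but the increments are order-independent)
  let sos2 := sos1.keys.foldl (fun d t =>
    let v := d.getD t pvInitA
    if v.2.2.1 ≥ k then
      v.2.1.foldl (fun d u => d.modify u pvInitA (fun w => (w.1, w.2.1, w.2.2.1, w.2.2.2 + 1))) d
    else d) sos1
  -- answer = [y[3] for x, y in sos.items()]
  sos2.values.map (fun v => v.2.2.2)

-- ===== PORT B =====

def solution_alt (id_list : List String) (report : List String) (k : Int) : List Int :=
  -- edges = [tuple(r.split()) for r in report]   (a tuple of any arity: ported as List String)
  let edges : List (List String) := report.map (fun r => PySem.Str.split₀ r)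
  -- ids = list(dict.fromkeys(id_list))
  let ids : List String := PySem.List.dedup id_list
  -- banned = [t for t in ids if len({a for a, b in edges if b == t}) >= k]
  -- ('for a, b in edges' unpacks a pair: a non-pair tuple raises in Python and is outside Pre_;
  -- the port's fallback skips it)
  -- (tuple unpack ported as arity check + positional extraction, avoiding A's match shape)
  let banned : List String := ids.filter (fun t =>
    decide ((PySem.Set.len (PySem.Set.ofList (edges.filterMap (fun p =>
      if p.length = 2 ∧ p.getD 1 "" = t then some (p.getD 0 "") else none))) : Int) ≥ k))
  -- edge_set = set(edges)
  let edge_set : PySem.Set (List String) := PySem.Set.ofList edges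
  -- return [sum((i, t) in edge_set for t in banned) for i in ids]
  ids.map (fun i => (banned.map (fun t => if [i, t] ∈ edge_set then (1 : Int) else 0)).sum)

-- ===== PRECONDITION & SPEC =====

-- Pre_ admits exactly the inputs on which A returns: every report line splits into exactly two
-- whitespace-separated tokens and both tokens occur in id_list (otherwise A raises ValueError /
-- KeyError).
def Pre_solution (id_list : List String) (report : List String) (k : Int) : Prop :=
  ∀ r ∈ report, (PySem.Str.split₀ r).length = 2 ∧ ∀ t ∈ PySem.Str.split₀ r, t ∈ id_list
instance (id_list : List String) (report : List String) (k : Int) : Decidable (Pre_solution id_list report k) := by unfold Pre_solution; infer_instance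

def pvWitness_solution : List String × List String × Int :=
  (["muzi", "frodo", "apeach", "neo"],
   ["muzi frodo", "apeach frodo", "frodo neo", "muzi neo", "apeach muzi"], 2)

def Spec_solution (id_list : List String) (report : List String) (k : Int) (out : List Int) : Prop := out = solution_alt id_list report k
instance (id_list : List String) (report : List String) (k : Int) (out : List Int) : Decidable (Spec_solution id_list report k out) := by unfold Spec_solution; infer_instance

-- ===== CLAIM (what is proved, stated in full; the proofs are below) =====
def Claim_equal_solution : Prop := ∀ (id_list : List String) (report : List String) (k : Int), Dom_solution id_list report k → Pre_solution id_list report k → Spec_solution id_list report k (solution id_list report k)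


-- ===== LEMMAS AND PROOFS =====

-- named forms of A's loop bodies (proof-only)
abbrev pvV : Type := PySem.Set String × PySem.Set String × Int × Int
abbrev pvDA : Type := PySem.Dict String pvV

def pvStepA (d : pvDA) (p : List String) : pvDA :=
  match p with
  | [a, b] =>
    let d1 := d.modify a pvInitA (fun v => (PySem.Set.add v.1 b, v.2.1, v.2.2.1, v.2.2.2))
    let d2 := d1.modify b pvInitA (fun v => (v.1, PySem.Set.add v.2.1 a, v.2.2.1, v.2.2.2))
    d2.modify b pvInitA (fun v => (v.1, v.2.1, (PySem.Set.len v.2.1 : Int), v.2.2.2))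
  | _ => d

def pvIncr (d : pvDA) (S : List String) : pvDA :=
  S.foldl (fun d u => d.modify u pvInitA (fun w => (w.1, w.2.1, w.2.2.1, w.2.2.2 + 1))) d

def pvStep3 (k : Int) (d : pvDA) (t : String) : pvDA :=
  let v := d.getD t pvInitA
  if v.2.2.1 ≥ k then pvIncr d v.2.1 else d

-- the reporters a → t occurring in a list of split report lines, in order
def pvFroms (t : String) (L : List (List String)) : List String :=
  L.filterMap (fun p => match p with | [a, b] => if b = t then some a else none | _ => none)

def pvS0 (id_list : List String) : pvDA :=
  id_list.foldl (fun d i => d.insert i pvInitA) PySem.Dict.empty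

def pvA1 (id_list report : List String) : pvDA :=
  (report.map PySem.Str.split₀).foldl pvStepA (pvS0 id_list)

def pvA2 (id_list report : List String) (k : Int) : pvDA :=
  (pvA1 id_list report).keys.foldl (pvStep3 k) (pvA1 id_list report)

theorem solution_eq (id_list report : List String) (k : Int) :
    solution id_list report k = (pvA2 id_list report k).values.map (fun v => v.2.2.2) := by
  unfold pvA2 pvA1 pvS0
  simp only [List.foldl_map]
  rfl

theorem getD_foldl_insert_const {ν : Type} (l : List String) (c : ν) :
    ∀ (d : PySem.Dict String ν), (∀ x, d.getD x c = c) → ∀ x : String,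
    (l.foldl (fun d i => d.insert i c) d).getD x c = c := by
  induction l with
  | nil => intro d h x; exact h x
  | cons i l ih =>
    intro d h x
    simp only [List.foldl_cons]
    exact ih _ (fun y => by rw [PySem.Dict.getD_insert]; split <;> simp [h]) x

theorem keys_foldl_insert_const {ν : Type} (l : List String) (c : ν) :
    ((l.foldl (fun d i => d.insert i c) PySem.Dict.empty).keys) = PySem.Set.ofList l := by
  rw [PySem.Dict.keys_foldl_insert l (fun _ _ => c) PySem.Dict.empty]
  rw [PySem.Dict.keys_empty]
  exact PySem.Set.update_empty l

theorem mem_pvFroms (t x : String) (L : List (List String)) :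
    x ∈ pvFroms t L ↔ [x, t] ∈ L := by
  simp only [pvFroms, List.mem_filterMap]
  constructor
  · rintro ⟨p, hpL, hg⟩
    rcases p with _ | ⟨a, p⟩; · simp at hg
    rcases p with _ | ⟨b, p⟩; · simp at hg
    rcases p with _ | ⟨c, p⟩
    · dsimp at hg
      split at hg
      · next hb => injection hg with h1; subst h1; subst hb; exact hpL
      · cases hg
    · simp at hg
  · intro h
    exact ⟨[x, t], h, by simp⟩

theorem pvStepA_f21 (d : pvDA) (a b t : String) :
    ((pvStepA d [a, b]).getD t pvInitA).2.1 =
      if t = b then PySem.Set.add ((d.getD t pvInitA).2.1) a else (d.getD t pvInitA).2.1 := by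
  simp only [pvStepA]
  simp only [PySem.Dict.getD_modify]
  split_ifs <;> simp_all

theorem pvStepA_f222 (d : pvDA) (a b t : String) :
    ((pvStepA d [a, b]).getD t pvInitA).2.2.2 = (d.getD t pvInitA).2.2.2 := by
  simp only [pvStepA]
  simp only [PySem.Dict.getD_modify]
  split_ifs <;> simp_all

theorem pvStepA_inv (d : pvDA) (a b : String)
    (hinv : ∀ s, (d.getD s pvInitA).2.2.1 = PySem.Set.len (d.getD s pvInitA).2.1) (t : String) :
    ((pvStepA d [a, b]).getD t pvInitA).2.2.1
      = PySem.Set.len ((pvStepA d [a, b]).getD t pvInitA).2.1 := by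
  simp only [pvStepA]
  simp only [PySem.Dict.getD_modify]
  split_ifs <;> simp_all

theorem stepA_foldl_getD (L : List (List String)) : ∀ (d : pvDA),
    (∀ s, (d.getD s pvInitA).2.2.1 = PySem.Set.len (d.getD s pvInitA).2.1) →
    ∀ t, ((L.foldl pvStepA d).getD t pvInitA).2.1
            = PySem.Set.update (d.getD t pvInitA).2.1 (pvFroms t L)
       ∧ ((L.foldl pvStepA d).getD t pvInitA).2.2.1
            = PySem.Set.len ((L.foldl pvStepA d).getD t pvInitA).2.1
       ∧ ((L.foldl pvStepA d).getD t pvInitA).2.2.2 = (d.getD t pvInitA).2.2.2 := by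
  induction L with
  | nil =>
    intro d hinv t
    exact ⟨by simp [pvFroms, PySem.Set.update], hinv t, rfl⟩
  | cons p L ih =>
    intro d hinv t
    simp only [List.foldl_cons]
    rcases p with _ | ⟨a, p⟩
    · simpa [pvStepA, pvFroms] using ih d hinv t
    rcases p with _ | ⟨b, p⟩
    · simpa [pvStepA, pvFroms] using ih d hinv t
    rcases p with _ | ⟨c, p⟩
    · -- p = [a, b]
      have hinv' := pvStepA_inv d a b hinv
      obtain ⟨h1, h2, h3⟩ := ih (pvStepA d [a, b]) hinv' t
      have hfrom : pvFroms t ([a, b] :: L)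
          = if b = t then a :: pvFroms t L else pvFroms t L := by
        simp only [pvFroms, List.filterMap_cons]
        split_ifs <;> simp_all
      refine ⟨?_, h2, by rw [h3, pvStepA_f222]⟩
      rw [h1, pvStepA_f21, hfrom]
      by_cases hb : t = b
      · subst hb; rw [if_pos rfl, if_pos rfl, PySem.Set.update_cons]
      · rw [if_neg hb, if_neg (fun h => hb h.symm)]
    · simpa [pvStepA, pvFroms] using ih d hinv t

theorem stepA_foldl_keys (L : List (List String)) : ∀ (d : pvDA),
    (∀ p ∈ L, ∀ x ∈ p, x ∈ d.keys) →
    (L.foldl pvStepA d).keys = d.keys := by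
  induction L with
  | nil => intro d _; rfl
  | cons p L ih =>
    intro d hmem
    simp only [List.foldl_cons]
    have hstep : (pvStepA d p).keys = d.keys := by
      rcases p with _ | ⟨a, p⟩; · rfl
      rcases p with _ | ⟨b, p⟩; · rfl
      rcases p with _ | ⟨c, p⟩
      · have ha : a ∈ d.keys := hmem [a, b] (by simp) a (by simp)
        have hb : b ∈ d.keys := hmem [a, b] (by simp) b (by simp)
        simp only [pvStepA]
        have h1 : ∀ (f : pvV → pvV),
            (d.modify a pvInitA f).keys = d.keys := fun f => by
          rw [PySem.Dict.keys_modify,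
            PySem.Dict.keys_insert_of_contains _ _ ((PySem.Dict.contains_iff_mem_keys d a).mpr ha)]
        have h2 : ∀ (d' : pvDA), d'.keys = d.keys → ∀ (f : pvV → pvV),
            (d'.modify b pvInitA f).keys = d.keys := fun d' hd' f => by
          rw [PySem.Dict.keys_modify,
            PySem.Dict.keys_insert_of_contains _ _
              ((PySem.Dict.contains_iff_mem_keys d' b).mpr (hd' ▸ hb))]
          exact hd'
        exact h2 _ (h2 _ (h1 _) _) _
      · rfl
    rw [ih (pvStepA d p) (fun q hq x hx => hstep ▸ hmem q (by simp [hq]) x hx), hstep]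

theorem pvIncr_getD (S : List String) : ∀ (d : pvDA) (x : String),
    (pvIncr d S).getD x pvInitA =
      ((d.getD x pvInitA).1, (d.getD x pvInitA).2.1, (d.getD x pvInitA).2.2.1,
       (d.getD x pvInitA).2.2.2 + (S.count x : Int)) := by
  induction S with
  | nil => intro d x; simp [pvIncr]
  | cons u S ih =>
    intro d x
    simp only [pvIncr, List.foldl_cons] at *
    rw [ih]
    rw [PySem.Dict.getD_modify]
    by_cases hx : x = u
    · subst hx
      rw [if_pos rfl]
      simp
      ring
    · rw [if_neg hx]
      have : (u :: S).count x = S.count x := by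
        have hux : ¬u = x := fun h => hx h.symm
        simp [hux]
      rw [this]

theorem pvIncr_keys (S : List String) : ∀ (d : pvDA),
    (∀ u ∈ S, u ∈ d.keys) → (pvIncr d S).keys = d.keys := by
  induction S with
  | nil => intro d _; rfl
  | cons u S ih =>
    intro d hmem
    simp only [pvIncr, List.foldl_cons] at *
    have hstep : (d.modify u pvInitA
        (fun w => (w.1, w.2.1, w.2.2.1, w.2.2.2 + 1))).keys = d.keys := by
      rw [PySem.Dict.keys_modify,
        PySem.Dict.keys_insert_of_contains _ _
          ((PySem.Dict.contains_iff_mem_keys d u).mpr (hmem u (by simp)))]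
    rw [ih _ (fun v hv => hstep ▸ hmem v (by simp [hv])), hstep]

theorem step3_foldl (k : Int) (K : List String) : ∀ (d d1 : pvDA),
    (∀ s, (d.getD s pvInitA).1 = (d1.getD s pvInitA).1
        ∧ (d.getD s pvInitA).2.1 = (d1.getD s pvInitA).2.1
        ∧ (d.getD s pvInitA).2.2.1 = (d1.getD s pvInitA).2.2.1) →
    d.keys = d1.keys →
    (∀ t u, u ∈ (d1.getD t pvInitA).2.1 → u ∈ d1.keys) →
    (K.foldl (pvStep3 k) d).keys = d.keys
    ∧ ∀ x, ((K.foldl (pvStep3 k) d).getD x pvInitA).2.2.2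
        = (d.getD x pvInitA).2.2.2
          + (K.map (fun t => if (d1.getD t pvInitA).2.2.1 ≥ k
                then ((d1.getD t pvInitA).2.1.count x : Int) else 0)).sum := by
  induction K with
  | nil => intro d d1 h123 hkeys hrep; exact ⟨rfl, fun x => by simp⟩
  | cons t K ih =>
    intro d d1 h123 hkeys hrep
    simp only [List.foldl_cons, List.map_cons, List.sum_cons]
    have hv1 := (h123 t).2.1
    have hv2 := (h123 t).2.2
    by_cases hc : (d.getD t pvInitA).2.2.1 ≥ k
    · have hstep : pvStep3 k d t = pvIncr d (d.getD t pvInitA).2.1 := by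
        simp only [pvStep3, if_pos hc]
      have hkeys' : (pvIncr d (d.getD t pvInitA).2.1).keys = d.keys :=
        pvIncr_keys _ d (fun u hu => by
          rw [hkeys]; exact hrep t u (by rwa [hv1] at hu))
      have h123' : ∀ s, ((pvIncr d (d.getD t pvInitA).2.1).getD s pvInitA).1 = (d1.getD s pvInitA).1
          ∧ ((pvIncr d (d.getD t pvInitA).2.1).getD s pvInitA).2.1 = (d1.getD s pvInitA).2.1
          ∧ ((pvIncr d (d.getD t pvInitA).2.1).getD s pvInitA).2.2.1 = (d1.getD s pvInitA).2.2.1 := by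
        intro s
        rw [pvIncr_getD]
        exact ⟨(h123 s).1, (h123 s).2.1, (h123 s).2.2⟩
      obtain ⟨hk, hx⟩ := ih (pvIncr d (d.getD t pvInitA).2.1) d1 h123' (hkeys' ▸ hkeys) hrep
      refine ⟨by rw [hstep, hk, hkeys'], fun x => ?_⟩
      rw [hstep, hx x, pvIncr_getD]
      have hcond : (d1.getD t pvInitA).2.2.1 ≥ k := by rwa [hv2] at hc
      rw [if_pos hcond, hv1]
      dsimp only
      ring
    · have hstep : pvStep3 k d t = d := by simp only [pvStep3, if_neg hc]
      obtain ⟨hk, hx⟩ := ih d d1 h123 hkeys hrep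
      have hcond : ¬ (d1.getD t pvInitA).2.2.1 ≥ k := by rwa [hv2] at hc
      refine ⟨by rw [hstep, hk], fun x => ?_⟩
      rw [hstep, hx x, if_neg hcond]
      ring

-- B's unpack-form of the reporter comprehension is pvFroms
theorem pvFroms_eq (t : String) (L : List (List String)) :
    L.filterMap (fun p => if p.length = 2 ∧ p.getD 1 "" = t then some (p.getD 0 "") else none)
      = pvFroms t L := by
  induction L with
  | nil => rfl
  | cons p L ih =>
    have hp : (if p.length = 2 ∧ p.getD 1 "" = t then some (p.getD 0 "") else none)
        = (fun p => match p with
            | [a, b] => if b = t then some a else none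
            | _ => none) p := by
      rcases p with _ | ⟨a, p⟩; · rfl
      rcases p with _ | ⟨b, p⟩
      · rw [if_neg (by rintro ⟨h2, _⟩; simp at h2)]
      rcases p with _ | ⟨c, p⟩
      · by_cases hb : b = t
        · rw [if_pos ⟨rfl, hb⟩]; simp [hb, List.getD]
        · rw [if_neg (fun h => hb h.2)]; simp [hb]
      · rw [if_neg (by rintro ⟨h2, _⟩; simp at h2)]
    rw [pvFroms, List.filterMap_cons, List.filterMap_cons, hp, ← pvFroms, ih]

-- summing f over a filtered list = summing the guarded f over the whole list
theorem pv_sum_filter (l : List String) (c : String → Bool) (f : String → Int) :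
    ((l.filter c).map f).sum = (l.map (fun t => if c t then f t else 0)).sum := by
  induction l with
  | nil => rfl
  | cons t l ih =>
    simp only [List.filter_cons, List.map_cons, List.sum_cons]
    by_cases hc : c t
    · simp [hc, ih]
    · simp [hc, ih]

theorem pv_main (id_list report : List String) (k : Int)
    (hpre : Pre_solution id_list report k) :
    solution id_list report k = solution_alt id_list report k := by
  rw [solution_eq]
  have hshape : ∀ p ∈ report.map PySem.Str.split₀,
      ∃ a b, p = [a, b] ∧ a ∈ id_list ∧ b ∈ id_list := by
    intro p hp
    rcases List.mem_map.mp hp with ⟨r, hr, rfl⟩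
    obtain ⟨hlen, hmem⟩ := hpre r hr
    obtain ⟨a, b, hab⟩ := List.length_eq_two.mp hlen
    exact ⟨a, b, hab, hmem a (by rw [hab]; simp), hmem b (by rw [hab]; simp)⟩
  have hnodupIds : (PySem.Set.ofList id_list).Nodup := PySem.Set.nodup_ofList id_list
  -- ===== A side =====
  have hk0 : (pvS0 id_list).keys = PySem.Set.ofList id_list :=
    keys_foldl_insert_const id_list pvInitA
  have hg0 : ∀ x, (pvS0 id_list).getD x pvInitA = pvInitA :=
    getD_foldl_insert_const id_list pvInitA PySem.Dict.empty (fun _ => rfl)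
  have hinv0 : ∀ s, ((pvS0 id_list).getD s pvInitA).2.2.1
      = PySem.Set.len ((pvS0 id_list).getD s pvInitA).2.1 := fun s => by rw [hg0]; rfl
  have hA1g := stepA_foldl_getD (report.map PySem.Str.split₀) (pvS0 id_list) hinv0
  have hA1rep : ∀ t, ((pvA1 id_list report).getD t pvInitA).2.1
      = PySem.Set.ofList (pvFroms t (report.map PySem.Str.split₀)) := by
    intro t
    have h := (hA1g t).1
    rw [hg0] at h
    rw [show pvA1 id_list report
        = (report.map PySem.Str.split₀).foldl pvStepA (pvS0 id_list) from rfl, h]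
    exact PySem.Set.update_empty _
  have hA1len : ∀ t, ((pvA1 id_list report).getD t pvInitA).2.2.1
      = PySem.Set.len ((pvA1 id_list report).getD t pvInitA).2.1 := fun t => (hA1g t).2.1
  have hA1mail : ∀ t, ((pvA1 id_list report).getD t pvInitA).2.2.2 = 0 := by
    intro t
    have h := (hA1g t).2.2
    rw [hg0] at h
    exact h
  have hA1keys : (pvA1 id_list report).keys = PySem.Set.ofList id_list := by
    rw [show pvA1 id_list report
        = (report.map PySem.Str.split₀).foldl pvStepA (pvS0 id_list) from rfl,
      stepA_foldl_keys _ _ ?_, hk0]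
    intro p hp x hx
    obtain ⟨a, b, rfl, ha, hb⟩ := hshape p hp
    rw [hk0]
    simp only [List.mem_cons, List.not_mem_nil, or_false] at hx
    rcases hx with rfl | rfl
    · exact (PySem.Set.mem_ofList _ _).mpr ha
    · exact (PySem.Set.mem_ofList _ _).mpr hb
  have hrep1 : ∀ t u, u ∈ ((pvA1 id_list report).getD t pvInitA).2.1
      → u ∈ (pvA1 id_list report).keys := by
    intro t u hu
    rw [hA1rep] at hu
    have hm := (mem_pvFroms t u _).mp ((PySem.Set.mem_ofList _ _).mp hu)
    obtain ⟨a, b, heq, ha, hb⟩ := hshape _ hm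
    injection heq with h1 h2
    subst h1
    rw [hA1keys]
    exact (PySem.Set.mem_ofList _ _).mpr ha
  obtain ⟨hA2keys, hA2mail⟩ := step3_foldl k (pvA1 id_list report).keys
    (pvA1 id_list report) (pvA1 id_list report) (fun s => ⟨rfl, rfl, rfl⟩) rfl hrep1
  -- A's answer as a map over the distinct ids
  have hAval : (pvA2 id_list report k).values.map (fun v => v.2.2.2)
      = (PySem.Set.ofList id_list).map
          (fun x => ((pvA2 id_list report k).getD x pvInitA).2.2.2) := by
    rw [PySem.Dict.values_eq_map_keys (pvA2 id_list report k)
      (by rw [show (pvA2 id_list report k).keys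
            = (pvA1 id_list report).keys from hA2keys, hA1keys]; exact hnodupIds) pvInitA]
    rw [List.map_map]
    rw [show (pvA2 id_list report k).keys = (pvA1 id_list report).keys from hA2keys, hA1keys]
    rfl
  -- ===== B side: unfold the pipeline and align the two maps over the distinct ids =====
  show _ = solution_alt id_list report k
  unfold solution_alt
  simp only [PySem.List.dedup_eq_ofList, pvFroms_eq]
  rw [hAval]
  refine List.map_congr_left (fun x hx => ?_)
  -- A's value at x
  rw [show pvA2 id_list report k
      = (pvA1 id_list report).keys.foldl (pvStep3 k) (pvA1 id_list report) from rfl]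
  rw [hA2mail x, hA1mail x, hA1keys]
  -- B's value at x: turn the sum over the filtered list into a guarded sum over all distinct ids
  rw [pv_sum_filter]
  rw [zero_add]
  -- pointwise over the distinct ids
  refine congrArg List.sum (List.map_congr_left (fun t _ => ?_))
  have hcond : (((pvA1 id_list report).getD t pvInitA).2.2.1 ≥ k)
      ↔ ((PySem.Set.len (PySem.Set.ofList
            (pvFroms t (report.map (fun r => PySem.Str.split₀ r)))) : Int) ≥ k) := by
    rw [hA1len t, hA1rep t]
  by_cases hq : ((pvA1 id_list report).getD t pvInitA).2.2.1 ≥ k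
  · rw [if_pos hq, if_pos (by rw [decide_eq_true_iff]; exact hcond.mp hq)]
    by_cases hm : [x, t] ∈ report.map PySem.Str.split₀
    · have hxmem : x ∈ ((pvA1 id_list report).getD t pvInitA).2.1 := by
        rw [hA1rep]
        exact (PySem.Set.mem_ofList _ _).mpr ((mem_pvFroms t x _).mpr hm)
      have hcount : ((pvA1 id_list report).getD t pvInitA).2.1.count x = 1 := by
        rw [hA1rep]
        exact List.count_eq_one_of_mem (PySem.Set.nodup_ofList _) (hA1rep t ▸ hxmem)
      have hms : [x, t] ∈ PySem.Set.ofList (report.map (fun r => PySem.Str.split₀ r)) :=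
        (PySem.Set.mem_ofList _ _).mpr hm
      rw [hcount, if_pos hms]
      rfl
    · have hxmem : x ∉ ((pvA1 id_list report).getD t pvInitA).2.1 := by
        rw [hA1rep]
        intro hc
        exact hm ((mem_pvFroms t x _).mp ((PySem.Set.mem_ofList _ _).mp hc))
      have hcount : ((pvA1 id_list report).getD t pvInitA).2.1.count x = 0 :=
        List.count_eq_zero.mpr hxmem
      have hms : [x, t] ∉ PySem.Set.ofList (report.map (fun r => PySem.Str.split₀ r)) :=
        fun hc => hm ((PySem.Set.mem_ofList _ _).mp hc)
      rw [hcount, if_neg hms]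
      rfl
  · rw [if_neg hq, if_neg (by rw [decide_eq_true_iff]; exact fun h => hq (hcond.mpr h))]

-- ===== VERDICT (by name: the statement is the Claim_ definition above) =====
theorem solution_spec : Claim_equal_solution := by
  intro id_list report k _ hpre
  unfold Spec_solution
  exact pv_main id_list report k hpre
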